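-- pv_equiv track=rewrite | github.com/zagara2/TopCoderSolutions | TxMsg/TxMsg.py | transform
-- ===== SOURCE A (Python) =====
-- def isVowel(let):
--     return let in "aeiouAEIOU"
--
-- def allVowels(word):
--     for ch in word:
--         if not isVowel(ch):
--             return False
--     return True
--
-- def transform(word):
--     if allVowels(word):
--         return word
--     else:
--         blankstring = ""
--         for x in range(len(word)):
--             if isVowel(word[x]) == False:
--                 if x == 0:
--                     blankstring = blankstring + word[x]
--                 else:
--                     if isVowel(word[x-1]):
--                         blankstring = blankstring + word[x]
--
--         return blankstring
-- ===== SOURCE B (Python) =====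
-- def transform(word):
--     # kept characters = the first character of each maximal run of non-vowels
--     vowels = "aeiouAEIOU"
--     firsts = []
--     i, n = 0, len(word)
--     while i < n:
--         if word[i] in vowels:
--             i += 1
--         else:
--             firsts.append(word[i])
--             while i < n and word[i] not in vowels:
--                 i += 1
--     return ''.join(firsts) or word
-- ===== Notes on version B (the rewrite author's own statement) =====
-- stated objective: alternative
-- what changed: Replaces A's allVowels pre-scan plus per-index loop re-reading word[x-1] with a run-skipping scan that emits the first character of each maximal non-vowel run (each such run starts the word or follows a vowel) and falls back to the word when no run exists.
import Mathlib
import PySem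

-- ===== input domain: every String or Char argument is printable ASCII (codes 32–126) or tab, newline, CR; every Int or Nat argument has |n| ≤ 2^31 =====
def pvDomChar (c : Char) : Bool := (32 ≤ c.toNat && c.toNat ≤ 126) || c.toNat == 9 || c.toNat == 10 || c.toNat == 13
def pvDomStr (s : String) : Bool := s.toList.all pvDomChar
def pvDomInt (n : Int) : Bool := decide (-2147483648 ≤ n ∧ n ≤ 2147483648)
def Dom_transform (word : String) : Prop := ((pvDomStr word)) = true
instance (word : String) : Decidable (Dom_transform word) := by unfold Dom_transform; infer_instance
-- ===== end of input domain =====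

-- B replaces A's allVowels pre-scan plus index loop (re-reading word[x-1]) with a run-skipping
-- scan emitting the first char of each maximal non-vowel run, falling back to the original word
-- when there is no such run (objective: alternative decomposition, same O(n) cost).

-- ===== PORT A =====
-- 'let in "aeiouAEIOU"': membership of a single char, exact as list membership
def isVowelA (c : Char) : Bool := ("aeiouAEIOU".toList).contains c

-- allVowels: loop with early return False
def allVowelsA : List Char → Bool
  | [] => true
  | c :: t => if ¬ (isVowelA c = true) then false else allVowelsA t

-- blankstring built by concatenation, modeled as a List Char accumulator (exact: '' .. + word[x])
def transform (word : String) : String :=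
  if allVowelsA word.toList then word
  else
    let l := word.toList
    let bs := (PySem.List.pyRange 0 (l.length) 1).foldl (fun acc x =>
      match PySem.List.pyGet? l x with
      | some c =>
        if isVowelA c = false then
          if x = 0 then acc ++ [c]
          else
            match PySem.List.pyGet? l (x - 1) with
            | some p => if isVowelA p then acc ++ [c] else acc
            | none => acc   -- unreachable: 0 < x < len
        else acc
      | none => acc         -- unreachable: 0 ≤ x < len
      ) ([] : List Char)
    String.ofList bs

-- ===== PORT B =====
-- 'ch in vowels' with vowels = "aeiouAEIOU"
def isVowelB (c : Char) : Bool := ("aeiouAEIOU".toList).contains c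

-- Source B's while loop over index i, as structural recursion on the remaining suffix:
-- a vowel is stepped over; at a non-vowel its char is emitted and the whole run is skipped
def firstsB : List Char → List Char
  | [] => []
  | c :: t =>
    if isVowelB c then firstsB t
    else c :: firstsB (t.dropWhile (fun x => !isVowelB x))
  termination_by l => l.length
  decreasing_by
    · simp
    · simpa using Nat.lt_succ_of_le (List.length_dropWhile_le _ t)

def transform_alt (word : String) : String :=
  let f := firstsB word.toList
  if f ≠ [] then String.ofList f else word   -- ''.join(firsts) or word

-- ===== PRECONDITION & SPEC =====
def Spec_transform (word : String) (out : String) : Prop := out = transform_alt word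
instance (word : String) (out : String) : Decidable (Spec_transform word out) := by unfold Spec_transform; infer_instance

-- ===== CLAIM (what is proved, stated in full; the proofs are below) =====
def Claim_equal_transform : Prop := ∀ (word : String), Dom_transform word → Spec_transform word (transform word)

-- ===== LEMMAS AND PROOFS =====

-- reference: the kept consonants, carrying the "previous is a vowel (or start)" flag
def keepF (prev : Bool) : List Char → List Char
  | [] => []
  | c :: t => (if ¬ isVowelA c ∧ prev then [c] else []) ++ keepF (isVowelA c) t

lemma isVowelB_eq : isVowelB = isVowelA := rfl

lemma keepF_false_dropWhile (l : List Char) :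
    keepF false l = keepF true (l.dropWhile (fun x => !isVowelA x)) := by
  induction l with
  | nil => rfl
  | cons c t ih =>
    by_cases hv : isVowelA c = true
    · simp [keepF, List.dropWhile, hv]
    · simp only [Bool.not_eq_true] at hv
      simp [keepF, List.dropWhile, hv, ih]

lemma firstsB_eq_keepF (l : List Char) : firstsB l = keepF true l := by
  induction l using firstsB.induct with
  | case1 => simp [firstsB, keepF]
  | case2 c t hv ih =>
    rw [isVowelB_eq] at hv
    simp [firstsB, keepF, isVowelB_eq, hv, ih]
  | case3 c t hv ih =>
    rw [isVowelB_eq] at hv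
    simp only [Bool.not_eq_true] at hv
    rw [firstsB, isVowelB_eq, if_neg (by simp [hv])]
    simp only [isVowelB_eq] at ih
    rw [ih, ← keepF_false_dropWhile]
    simp [keepF, hv]

lemma keepF_nil_of_allV (l : List Char) (h : allVowelsA l = true) (prev : Bool) :
    keepF prev l = [] := by
  induction l generalizing prev with
  | nil => rfl
  | cons c t ih =>
    simp only [allVowelsA] at h
    by_cases hv : isVowelA c = true
    · simp only [keepF, hv]
      rw [ih (by simpa [hv] using h)]
      simp
    · simp [hv] at h

lemma keepF_ne_nil_of_not_allV (l : List Char) (h : allVowelsA l = false) :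
    keepF true l ≠ [] := by
  induction l with
  | nil => simp [allVowelsA] at h
  | cons c t ih =>
    simp only [allVowelsA] at h
    by_cases hv : isVowelA c = true
    · simp only [keepF, hv]
      simpa using ih (by simpa [hv] using h)
    · simp [keepF, hv]

lemma loopA (l : List Char) (k : Nat) (hk : k ≤ l.length) (acc : List Char) :
    (PySem.List.pyRange (k : Int) (l.length : Int) 1).foldl (fun acc x =>
      match PySem.List.pyGet? l x with
      | some c =>
        if isVowelA c = false then
          if x = 0 then acc ++ [c]
          else
            match PySem.List.pyGet? l (x - 1) with
            | some p => if isVowelA p then acc ++ [c] else acc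
            | none => acc
        else acc
      | none => acc) acc
    = acc ++ keepF (k == 0 || isVowelA ((l[k-1]?).getD ' ')) (l.drop k) := by
  induction hn : l.length - k generalizing k acc with
  | zero =>
    have hk' : k = l.length := by omega
    subst hk'
    simp [keepF]
  | succ n ih =>
    have hlt : k < l.length := by omega
    rw [PySem.List.pyRange_one_cons (by exact_mod_cast hlt)]
    simp only [List.foldl_cons]
    have hget : PySem.List.pyGet? l (k : Int) = some l[k] := by
      rw [PySem.List.pyGet?_natCast]
      simp [List.getElem?_eq_getElem hlt]
    have hcast : (k : Int) + 1 = ((k + 1 : Nat) : Int) := by push_cast; ring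
    rw [hget, hcast, ih (k + 1) (by omega) _ (by omega)]
    dsimp only
    have hdrop : l.drop k = l[k] :: l.drop (k + 1) := List.drop_eq_getElem_cons hlt
    rw [hdrop]
    have hgetD1 : (l[(k+1)-1]?).getD ' ' = l[k] := by
      simp [List.getElem?_eq_getElem hlt]
    rw [hgetD1]
    by_cases hv : isVowelA l[k] = true
    · rw [if_neg (by simp [hv])]
      simp [keepF, hv]
    · rw [if_pos (by simpa using hv)]
      by_cases hk0 : k = 0
      · subst hk0
        simp only [Nat.cast_zero]
        rw [if_pos trivial]
        simp [keepF, hv]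
      · have hknz : (k : Int) ≠ 0 := by exact_mod_cast hk0
        rw [if_neg hknz]
        have hcast2 : (k : Int) - 1 = ((k - 1 : Nat) : Int) := by omega
        have hprev : PySem.List.pyGet? l ((k : Int) - 1) = some l[k-1] := by
          rw [hcast2, PySem.List.pyGet?_natCast]
          simp [List.getElem?_eq_getElem (show k - 1 < l.length by omega)]
        rw [hprev]
        dsimp only
        have hgetDk : (l[k-1]?).getD ' ' = l[k-1] := by
          simp [List.getElem?_eq_getElem (show k - 1 < l.length by omega)]
        rw [hgetDk]
        by_cases hp : isVowelA l[k-1] = true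
        · rw [if_pos hp]
          simp [keepF, hv, hp]
        · rw [if_neg hp]
          simp only [keepF]
          rw [if_neg (by simp [hv, hk0, hp])]
          simp [hv]

lemma transform_eq (word : String) : transform word = transform_alt word := by
  unfold transform transform_alt
  dsimp only
  rw [firstsB_eq_keepF]
  by_cases hall : allVowelsA word.toList = true
  · rw [if_pos hall]
    rw [keepF_nil_of_allV _ hall true]
    simp
  · rw [if_neg hall]
    have hne : keepF true word.toList ≠ [] :=
      keepF_ne_nil_of_not_allV _ (by simpa using hall)
    have hA := loopA word.toList 0 (by omega) []
    simp only [Nat.cast_zero, List.drop_zero, beq_self_eq_true, Bool.true_or] at hA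
    rw [hA]
    simp [hne]

-- ===== VERDICT (by name: the statement is the Claim_ definition above) =====
theorem transform_spec : Claim_equal_transform := by
  intro word _
  unfold Spec_transform
  exact transform_eq word
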